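-- pv_equiv track=rewrite | github.com/YashvantHange/Research_automation | tools/version_tools.py | is_pre_release_version
-- ===== SOURCE A (Python) =====
-- def is_pre_release_version(version_str: str) -> bool:
--     """
--     Check if version is a pre-release (beta, alpha, rc, dev, etc.).
--
--     Args:
--         version_str: Version string to check
--
--     Returns:
--         True if version is a pre-release
--     """
--     version_lower = version_str.lower()
--     pre_release_indicators = [
--         'alpha', 'beta', 'rc', 'dev', 'pre', 'snapshot',
--         '-a', '-b', '-rc', '-dev', '-pre', '-snapshot',
--         'a1', 'b1', 'rc1', 'dev1'
--     ]
--     return any(indicator in version_lower for indicator in pre_release_indicators)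
-- ===== SOURCE B (Python) =====
-- def is_pre_release_version(version_str: str) -> bool:
--     """Single positional scan: at each index, test whether any (subsumption-reduced)
--     indicator starts there, instead of one full substring search per indicator."""
--     s = version_str.lower()
--     indicators = ('alpha', 'beta', 'rc', 'dev', 'pre', 'snapshot', '-a', '-b', 'a1', 'b1')
--     for i in range(len(s)):
--         if s.startswith(indicators, i):
--             return True
--     return False
-- ===== Notes on version B (the rewrite author's own statement) =====
-- stated objective: alternative
-- what changed: Replaces A's per-indicator substring search (one scan of the string for each of 16 indicators) with a single left-to-right positional scan that tests startswith against a subsumption-reduced set of 10 indicators at each index.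
import Mathlib
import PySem

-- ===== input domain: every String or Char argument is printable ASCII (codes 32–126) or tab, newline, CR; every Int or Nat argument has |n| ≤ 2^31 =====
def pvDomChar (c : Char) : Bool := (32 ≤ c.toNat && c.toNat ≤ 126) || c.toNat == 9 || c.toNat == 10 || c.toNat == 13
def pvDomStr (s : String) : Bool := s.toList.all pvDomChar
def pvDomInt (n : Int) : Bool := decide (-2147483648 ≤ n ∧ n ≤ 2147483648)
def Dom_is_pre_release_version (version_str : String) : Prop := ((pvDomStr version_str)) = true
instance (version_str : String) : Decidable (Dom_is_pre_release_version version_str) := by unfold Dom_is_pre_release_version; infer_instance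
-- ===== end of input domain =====

-- B replaces A's per-indicator substring searches with one positional startswith scan over a subsumption-reduced indicator set (alternative decomposition, same results).


-- ===== PORT A =====
def is_pre_release_version (version_str : String) : Bool :=
  let version_lower := PySem.Str.lower version_str
  let pre_release_indicators : List String :=
    ["alpha", "beta", "rc", "dev", "pre", "snapshot",
     "-a", "-b", "-rc", "-dev", "-pre", "-snapshot",
     "a1", "b1", "rc1", "dev1"]
  pre_release_indicators.any (fun indicator => PySem.Str.isIn indicator version_lower)

-- ===== PORT B =====
def altIndicators : List String :=
  ["alpha", "beta", "rc", "dev", "pre", "snapshot", "-a", "-b", "a1", "b1"]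

-- the positional scan of Source B: at each index i (i.e. each nonempty suffix), test startswith
def altScan (cs : List Char) : Bool :=
  match cs with
  | [] => false
  | c :: t =>
      altIndicators.any (fun ind => PySem.Chars.startswith (c :: t) ind.toList) || altScan t

def is_pre_release_version_alt (version_str : String) : Bool :=
  altScan (PySem.Str.lower version_str).toList

-- ===== PRECONDITION & SPEC =====
def Spec_is_pre_release_version (version_str : String) (out : Bool) : Prop := out = is_pre_release_version_alt version_str
instance (version_str : String) (out : Bool) : Decidable (Spec_is_pre_release_version version_str out) := by unfold Spec_is_pre_release_version; infer_instance

-- ===== CLAIM (what is proved, stated in full; the proofs are below) =====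
def Claim_equal_is_pre_release_version : Prop := ∀ (version_str : String), Dom_is_pre_release_version version_str → Spec_is_pre_release_version version_str (is_pre_release_version version_str)

-- ===== LEMMAS AND PROOFS =====

-- the scan finds exactly the strings having some reduced indicator as an infix
lemma altScan_iff (cs : List Char) :
    altScan cs = true ↔ ∃ ind ∈ altIndicators, ind.toList <:+: cs := by
  induction cs with
  | nil =>
      simp only [altScan]
      constructor
      · intro h; cases h
      · rintro ⟨ind, hmem, hinf⟩
        rw [List.infix_nil] at hinf
        fin_cases hmem <;> simp_all
  | cons c t ih =>
      simp only [altScan, Bool.or_eq_true, List.any_eq_true, ih]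
      constructor
      · rintro (⟨ind, hmem, hsw⟩ | ⟨ind, hmem, hinf⟩)
        · exact ⟨ind, hmem, ((PySem.Chars.startswith_iff _ _).1 hsw).isInfix⟩
        · exact ⟨ind, hmem, hinf.trans (List.suffix_cons c t).isInfix⟩
      · rintro ⟨ind, hmem, hinf⟩
        rcases List.infix_cons_iff.1 hinf with hpre | hinf'
        · exact Or.inl ⟨ind, hmem, (PySem.Chars.startswith_iff _ _).2 hpre⟩
        · exact Or.inr ⟨ind, hmem, hinf'⟩

-- a full (16-element) indicator matches as infix iff a reduced (10-element) one does:
-- each dropped indicator contains a kept one as an infix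
lemma full_iff_reduced (cs : List Char) :
    (∃ ind ∈ ["alpha", "beta", "rc", "dev", "pre", "snapshot",
              "-a", "-b", "-rc", "-dev", "-pre", "-snapshot",
              "a1", "b1", "rc1", "dev1"], ind.toList <:+: cs) ↔
    (∃ ind ∈ altIndicators, ind.toList <:+: cs) := by
  constructor
  · rintro ⟨ind, hmem, hinf⟩
    fin_cases hmem
    · exact ⟨"alpha", by simp [altIndicators], hinf⟩
    · exact ⟨"beta", by simp [altIndicators], hinf⟩
    · exact ⟨"rc", by simp [altIndicators], hinf⟩
    · exact ⟨"dev", by simp [altIndicators], hinf⟩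
    · exact ⟨"pre", by simp [altIndicators], hinf⟩
    · exact ⟨"snapshot", by simp [altIndicators], hinf⟩
    · exact ⟨"-a", by simp [altIndicators], hinf⟩
    · exact ⟨"-b", by simp [altIndicators], hinf⟩
    · exact ⟨"rc", by simp [altIndicators], (by decide : ("rc".toList <:+: "-rc".toList)).trans hinf⟩
    · exact ⟨"dev", by simp [altIndicators], (by decide : ("dev".toList <:+: "-dev".toList)).trans hinf⟩
    · exact ⟨"pre", by simp [altIndicators], (by decide : ("pre".toList <:+: "-pre".toList)).trans hinf⟩
    · exact ⟨"snapshot", by simp [altIndicators], (by decide : ("snapshot".toList <:+: "-snapshot".toList)).trans hinf⟩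
    · exact ⟨"a1", by simp [altIndicators], hinf⟩
    · exact ⟨"b1", by simp [altIndicators], hinf⟩
    · exact ⟨"rc", by simp [altIndicators], (by decide : ("rc".toList <:+: "rc1".toList)).trans hinf⟩
    · exact ⟨"dev", by simp [altIndicators], (by decide : ("dev".toList <:+: "dev1".toList)).trans hinf⟩
  · rintro ⟨ind, hmem, hinf⟩
    fin_cases hmem <;> exact ⟨_, by simp, hinf⟩

-- ===== VERDICT (by name: the statement is the Claim_ definition above) =====
theorem is_pre_release_version_spec : Claim_equal_is_pre_release_version := by
  intro v _
  unfold Spec_is_pre_release_version is_pre_release_version is_pre_release_version_alt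
  rw [Bool.eq_iff_iff, altScan_iff]
  simp only [List.any_eq_true, PySem.Str.isIn_iff_infix]
  exact full_iff_reduced (PySem.Str.lower v).toList
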